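-- pv_equiv track=rewrite | github.com/pallavikundapur23-hub/PharmaGuard_1 | PharmaGuard-HealthTech/backend/services/risk_predictor.py | infer_diplotype
-- ===== SOURCE A (Python) =====
-- from typing import Dict, List
--
-- def infer_diplotype(patient_variants: List[Dict], gene_name: str) -> str:
--     """
--     Infer diplotype (star allele combination) from variants
--
--     Args:
--         patient_variants: List of matched variant dictionaries
--         gene_name: Gene name
--
--     Returns:
--         Diplotype string (e.g., "*1/*4")
--     """
--     if not patient_variants:
--         return "*1/*1"  # Default wild-type
--
--     star_alleles = []
--
--     for variant in patient_variants:
--         db_info = variant.get('db_info', {})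
--         star_allele = db_info.get('star_allele', '*1')
--         star_alleles.append(star_allele)
--
--     if not star_alleles:
--         return "*1/*1"
--
--     # Sort and return as diplotype
--     star_alleles = list(set(star_alleles))  # Remove duplicates
--     star_alleles.sort()
--
--     if len(star_alleles) == 1:
--         return f"{star_alleles[0]}/{star_alleles[0]}"
--     else:
--         return f"{star_alleles[0]}/{star_alleles[1]}"
-- ===== SOURCE B (Python) =====
-- def infer_diplotype(patient_variants, gene_name):
--     """Single selection pass keeping the two smallest distinct star alleles (no list, no set, no sort)."""
--     lo = None  # smallest distinct star allele seen so far
--     hi = None  # second-smallest distinct star allele seen so far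
--     for variant in patient_variants:
--         a = variant.get('db_info', {}).get('star_allele', '*1')
--         if lo is None:
--             lo = a
--         elif a == lo:
--             continue
--         elif a < lo:
--             lo, hi = a, lo
--         elif hi is None or a < hi:
--             hi = a
--     if lo is None:
--         return "*1/*1"
--     if hi is None:
--         return f"{lo}/{lo}"
--     return f"{lo}/{hi}"
-- ===== Notes on version B (the rewrite author's own statement) =====
-- stated objective: alternative
-- what changed: Replaces the collect-list / set-dedup / full sort / first-two-elements pipeline with a single selection pass that maintains only the two smallest distinct star alleles as running minima.
import Mathlib
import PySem

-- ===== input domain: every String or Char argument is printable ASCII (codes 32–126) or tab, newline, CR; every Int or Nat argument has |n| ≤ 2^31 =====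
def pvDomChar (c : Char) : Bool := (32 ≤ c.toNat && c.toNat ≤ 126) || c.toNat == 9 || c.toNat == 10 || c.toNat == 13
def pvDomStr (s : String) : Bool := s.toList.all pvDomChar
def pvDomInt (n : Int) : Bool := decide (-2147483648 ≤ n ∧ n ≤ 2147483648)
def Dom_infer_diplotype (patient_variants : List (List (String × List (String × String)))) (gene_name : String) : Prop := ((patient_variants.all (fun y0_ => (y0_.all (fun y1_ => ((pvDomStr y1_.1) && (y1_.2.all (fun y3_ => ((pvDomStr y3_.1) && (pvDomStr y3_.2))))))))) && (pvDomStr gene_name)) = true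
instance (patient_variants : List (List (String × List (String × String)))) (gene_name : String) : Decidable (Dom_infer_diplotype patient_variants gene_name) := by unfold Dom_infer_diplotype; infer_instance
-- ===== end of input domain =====

-- B replaces A's collect / dedup / sort / take-first-two pipeline by one selection pass keeping two running minima (alternative decomposition).

-- ===== PORT A =====
-- variant.get('db_info', {}).get('star_allele', '*1')
def pvStarOf (variant : List (String × List (String × String))) : String :=
  PySem.Dict.getD (PySem.Dict.mk (PySem.Dict.getD (PySem.Dict.mk variant) "db_info" [])) "star_allele" "*1"

def infer_diplotype (patient_variants : List (List (String × List (String × String)))) (gene_name : String) : String :=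
  if patient_variants = [] then "*1/*1"
  else
    let star_alleles : List String :=
      patient_variants.foldl (fun acc variant => acc ++ [pvStarOf variant]) []
    if star_alleles = [] then "*1/*1"
    else
      let star_alleles := PySem.List.sorted (PySem.Set.ofList star_alleles) (fun x => x) false
      if star_alleles.length = 1 then
        (PySem.List.pyGetD star_alleles 0 "") ++ "/" ++ (PySem.List.pyGetD star_alleles 0 "")
      else
        (PySem.List.pyGetD star_alleles 0 "") ++ "/" ++ (PySem.List.pyGetD star_alleles 1 "")

-- ===== PORT B =====
-- one step of B's loop: state = (smallest distinct allele so far, second-smallest so far)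
def pvStep (s : Option String × Option String) (a : String) : Option String × Option String :=
  match s with
  | (none, h) => (some a, h)
  | (some l, h) =>
    if a = l then (some l, h)
    else if a < l then (some a, some l)
    else
      match h with
      | none => (some l, some a)
      | some hh => if a < hh then (some l, some a) else (some l, some hh)

def infer_diplotype_alt (patient_variants : List (List (String × List (String × String)))) (gene_name : String) : String :=
  let st := patient_variants.foldl (fun s variant => pvStep s (pvStarOf variant)) (none, none)
  match st with
  | (none, _) => "*1/*1"
  | (some l, none) => l ++ "/" ++ l
  | (some l, some h) => l ++ "/" ++ h

-- ===== PRECONDITION & SPEC =====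
def Spec_infer_diplotype (patient_variants : List (List (String × List (String × String)))) (gene_name : String) (out : String) : Prop := out = infer_diplotype_alt patient_variants gene_name
instance (patient_variants : List (List (String × List (String × String)))) (gene_name : String) (out : String) : Decidable (Spec_infer_diplotype patient_variants gene_name out) := by unfold Spec_infer_diplotype; infer_instance

-- ===== CLAIM (what is proved, stated in full; the proofs are below) =====
def Claim_equal_infer_diplotype : Prop := ∀ (patient_variants : List (List (String × List (String × String)))) (gene_name : String), Dom_infer_diplotype patient_variants gene_name → Spec_infer_diplotype patient_variants gene_name (infer_diplotype patient_variants gene_name)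

-- ===== LEMMAS AND PROOFS =====

-- Invariant describing B's state after seeing the alleles xs.
def pvInv (xs : List String) (s : Option String × Option String) : Prop :=
  match s with
  | (none, h) => xs = [] ∧ h = none
  | (some l, none) => l ∈ xs ∧ (∀ y ∈ xs, y = l)
  | (some l, some h) => l ∈ xs ∧ h ∈ xs ∧ l < h ∧ (∀ y ∈ xs, l ≤ y) ∧ (∀ y ∈ xs, y = l ∨ h ≤ y)

theorem pvStep_inv (xs : List String) (s : Option String × Option String) (a : String)
    (hs : pvInv xs s) : pvInv (xs ++ [a]) (pvStep s a) := by
  obtain ⟨lo, hi⟩ := s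
  cases lo with
  | none =>
    obtain ⟨hx, hh⟩ := hs
    subst hx hh
    simp [pvStep, pvInv]
  | some l =>
    cases hi with
    | none =>
      obtain ⟨hl, hall⟩ := hs
      by_cases hal : a = l
      · subst hal
        simp only [pvStep, pvInv]
        constructor
        · exact List.mem_append_left _ hl
        · intro y hy
          rcases List.mem_append.1 hy with h | h
          · exact hall y h
          · simpa using h
      · rcases lt_or_gt_of_ne hal with hlt | hgt
        · simp only [pvStep, if_neg hal, if_pos hlt, pvInv]
          refine ⟨List.mem_append_right _ (by simp), List.mem_append_left _ hl, hlt, ?_, ?_⟩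
          · intro y hy
            rcases List.mem_append.1 hy with h | h
            · exact le_of_lt (lt_of_lt_of_le hlt (le_of_eq (hall y h).symm))
            · simp at h; simp [h]
          · intro y hy
            rcases List.mem_append.1 hy with h | h
            · exact Or.inr (le_of_eq (hall y h).symm)
            · simp at h; exact Or.inl h
        · have hnl : ¬ a < l := not_lt_of_gt hgt
          simp only [pvStep, if_neg hal, if_neg hnl, pvInv]
          refine ⟨List.mem_append_left _ hl, List.mem_append_right _ (by simp), hgt, ?_, ?_⟩
          · intro y hy
            rcases List.mem_append.1 hy with h | h
            · exact le_of_eq (hall y h).symm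
            · simp at h; exact le_of_lt (h ▸ hgt)
          · intro y hy
            rcases List.mem_append.1 hy with h | h
            · exact Or.inl (hall y h)
            · simp at h; exact Or.inr (le_of_eq h.symm)
    | some hh =>
      obtain ⟨hl, hhm, hlh, hmin, hsec⟩ := hs
      by_cases hal : a = l
      · subst hal
        simp only [pvStep, pvInv]
        refine ⟨List.mem_append_left _ hl, List.mem_append_left _ hhm, hlh, ?_, ?_⟩
        · intro y hy
          rcases List.mem_append.1 hy with h | h
          · exact hmin y h
          · simp at h; simp [h]
        · intro y hy
          rcases List.mem_append.1 hy with h | h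
          · exact hsec y h
          · simp at h; exact Or.inl h
      · rcases lt_or_gt_of_ne hal with hlt | hgt
        · simp only [pvStep, if_neg hal, if_pos hlt, pvInv]
          refine ⟨List.mem_append_right _ (by simp), List.mem_append_left _ hl, hlt, ?_, ?_⟩
          · intro y hy
            rcases List.mem_append.1 hy with h | h
            · exact le_of_lt (lt_of_lt_of_le hlt (hmin y h))
            · simp at h; simp [h]
          · intro y hy
            rcases List.mem_append.1 hy with h | h
            · rcases hsec y h with h' | h'
              · exact Or.inr (le_of_eq h'.symm)
              · exact Or.inr (le_of_lt (lt_of_lt_of_le hlh h'))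
            · simp at h; exact Or.inl h
        · have hnl : ¬ a < l := not_lt_of_gt hgt
          by_cases hah : a < hh
          · simp only [pvStep, if_neg hal, if_neg hnl, if_pos hah, pvInv]
            refine ⟨List.mem_append_left _ hl, List.mem_append_right _ (by simp), hgt, ?_, ?_⟩
            · intro y hy
              rcases List.mem_append.1 hy with h | h
              · exact hmin y h
              · simp at h; exact le_of_lt (h ▸ hgt)
            · intro y hy
              rcases List.mem_append.1 hy with h | h
              · rcases hsec y h with h' | h'
                · exact Or.inl h'
                · exact Or.inr (le_of_lt (lt_of_lt_of_le hah h'))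
              · simp at h; exact Or.inr (le_of_eq h.symm)
          · simp only [pvStep, if_neg hal, if_neg hnl, if_neg hah, pvInv]
            refine ⟨List.mem_append_left _ hl, List.mem_append_left _ hhm, hlh, ?_, ?_⟩
            · intro y hy
              rcases List.mem_append.1 hy with h | h
              · exact hmin y h
              · simp at h; exact le_of_lt (h ▸ hgt)
            · intro y hy
              rcases List.mem_append.1 hy with h | h
              · exact hsec y h
              · simp at h; subst h; exact Or.inr (le_of_not_gt hah)

theorem pvFold_inv (xs : List String) : pvInv xs (xs.foldl pvStep (none, none)) := by
  induction xs using List.reverseRecOn with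
  | nil => simp [pvInv]
  | append_singleton ys a ih =>
    rw [List.foldl_append]
    simpa using pvStep_inv ys _ a ih

-- The sorted deduplicated list, characterised from the invariant.
theorem pvSorted_of_inv_one (xs : List String) (l : String)
    (h : pvInv xs (some l, none)) :
    PySem.List.sorted (PySem.Set.ofList xs) (fun x => x) false = [l] := by
  obtain ⟨hl, hall⟩ := h
  have hperm := PySem.List.sorted_perm (PySem.Set.ofList xs) (fun x : String => x) false
  have hpw := PySem.List.sorted_ofList_pairwise_lt (xs := xs)
  revert hperm hpw
  generalize PySem.List.sorted (PySem.Set.ofList xs) (fun x : String => x) false = s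
  intro hperm hpw
  have hmem : ∀ y, y ∈ s ↔ y ∈ xs := by
    intro y
    rw [hperm.mem_iff]
    simp [PySem.Set.mem_ofList]
  have hlmem : l ∈ s := (hmem l).2 hl
  cases s with
  | nil => simp at hlmem
  | cons b t =>
    have hb : b = l := hall b ((hmem b).1 (by simp))
    subst hb
    cases t with
    | nil => rfl
    | cons c u =>
      have hc : c = b := hall c ((hmem c).1 (by simp))
      have : b < c := (List.pairwise_cons.1 hpw).1 c (by simp)
      rw [hc] at this
      exact absurd this (lt_irrefl b)

theorem pvSorted_of_inv_two (xs : List String) (l h : String)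
    (hinv : pvInv xs (some l, some h)) :
    ∃ rest, PySem.List.sorted (PySem.Set.ofList xs) (fun x => x) false = l :: h :: rest := by
  obtain ⟨hl, hhm, hlh, hmin, hsec⟩ := hinv
  have hperm := PySem.List.sorted_perm (PySem.Set.ofList xs) (fun x : String => x) false
  have hpw := PySem.List.sorted_ofList_pairwise_lt (xs := xs)
  revert hperm hpw
  generalize PySem.List.sorted (PySem.Set.ofList xs) (fun x : String => x) false = s
  intro hperm hpw
  have hmem : ∀ y, y ∈ s ↔ y ∈ xs := by
    intro y
    rw [hperm.mem_iff]
    simp [PySem.Set.mem_ofList]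
  have hlmem : l ∈ s := (hmem l).2 hl
  have hhmem : h ∈ s := (hmem h).2 hhm
  cases s with
  | nil => simp at hlmem
  | cons b t =>
    have hbx : b ∈ xs := (hmem b).1 (by simp)
    have hble : ∀ y ∈ t, b < y := (List.pairwise_cons.1 hpw).1
    have hb : b = l := by
      rcases List.mem_cons.1 hlmem with h' | h'
      · exact h'.symm
      · exact absurd (hmin b hbx) (not_le_of_gt (hble l h'))
    subst hb
    have hht : h ∈ t := by
      rcases List.mem_cons.1 hhmem with h' | h'
      · exact absurd h' (ne_of_gt hlh)
      · exact h'
    cases t with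
    | nil => simp at hht
    | cons c u =>
      have hcx : c ∈ xs := (hmem c).1 (by simp)
      have hcne : c ≠ b := ne_of_gt (hble c (by simp))
      have hch : h ≤ c := (hsec c hcx).resolve_left hcne
      have hpw' : (c :: u).Pairwise (fun a b => a < b) := (List.pairwise_cons.1 hpw).2
      have hc : c = h := by
        rcases List.mem_cons.1 hht with h' | h'
        · exact h'.symm
        · exact absurd ((List.pairwise_cons.1 hpw').1 h h') (not_lt_of_ge hch)
      subst hc
      exact ⟨u, rfl⟩

theorem pvAlleles_eq (patient_variants : List (List (String × List (String × String)))) :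
    patient_variants.foldl (fun acc variant => acc ++ [pvStarOf variant]) [] =
      patient_variants.map pvStarOf := by
  induction patient_variants using List.reverseRecOn with
  | nil => rfl
  | append_singleton ys a ih => rw [List.foldl_append, ih]; simp

-- ===== VERDICT (by name: the statement is the Claim_ definition above) =====
theorem infer_diplotype_spec : Claim_equal_infer_diplotype := by
  intro pv g _
  unfold Spec_infer_diplotype infer_diplotype infer_diplotype_alt
  by_cases hpv : pv = []
  · subst hpv
    simp
  · rw [if_neg hpv]
    simp only [pvAlleles_eq]
    have hne : pv.map pvStarOf ≠ [] := by simpa using hpv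
    rw [if_neg hne]
    have hinv := pvFold_inv (pv.map pvStarOf)
    rw [List.foldl_map] at hinv
    rcases hstate : pv.foldl (fun s variant => pvStep s (pvStarOf variant)) (none, none) with ⟨lo, hi⟩
    rw [hstate] at hinv
    cases lo with
    | none => exact absurd hinv.1 hne
    | some l =>
      cases hi with
      | none =>
        rw [pvSorted_of_inv_one _ l hinv]
        simp [PySem.List.pyGetD]
      | some h =>
        obtain ⟨rest, hsrt⟩ := pvSorted_of_inv_two _ l h hinv
        rw [hsrt]
        have hlen : (l :: h :: rest).length ≠ 1 := by simp
        rw [if_neg hlen]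
        simp [PySem.List.pyGetD]
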